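-- pv_equiv track=rewrite | github.com/juandarr/ProjectEuler | 84.py | dices
-- ===== SOURCE A (Python) =====
-- def dices(sides):
--     dice_odds = {}
--     for i in range(1,sides+1):
--         for j in range(1,sides+1):
--             if i+j in dice_odds:
--                 dice_odds[i+j]+= 1
--             else:
--                 dice_odds[i+j] = 1
--     return dice_odds
-- ===== SOURCE B (Python) =====
-- def dices(sides):
--     return {s: sides - abs(s - (sides + 1)) for s in range(2, 2 * sides + 1)}
-- ===== Notes on version B (the rewrite author's own statement) =====
-- stated objective: faster
-- what changed: Replaced the quadratic nested dice loop building a counter dict with a single comprehension over the possible sums using the closed-form triangular count sides - |s - (sides+1)|.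
import Mathlib
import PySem

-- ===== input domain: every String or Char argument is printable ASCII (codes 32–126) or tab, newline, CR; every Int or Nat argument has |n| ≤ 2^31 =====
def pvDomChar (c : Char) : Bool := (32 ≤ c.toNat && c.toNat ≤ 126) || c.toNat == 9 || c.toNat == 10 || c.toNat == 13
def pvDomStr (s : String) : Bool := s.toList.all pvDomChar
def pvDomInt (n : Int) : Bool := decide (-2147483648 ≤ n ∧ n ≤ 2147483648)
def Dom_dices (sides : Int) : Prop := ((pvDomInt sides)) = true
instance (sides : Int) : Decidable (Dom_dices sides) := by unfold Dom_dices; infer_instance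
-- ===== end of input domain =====

-- B replaces A's O(sides^2) nested dice loop by the O(sides) closed-form count sides - |s - (sides+1)| per sum s.

-- ===== PORT A =====
-- literal port of A: nested loops over range(1, sides+1), counting each sum i+j in a dict
def dices (sides : Int) : List (Int × Int) :=
  ((PySem.List.pyRange 1 (sides + 1) 1).foldl
    (fun d i =>
      (PySem.List.pyRange 1 (sides + 1) 1).foldl
        (fun d j =>
          if d.contains (i + j) then d.modify (i + j) 0 (· + 1)
          else d.insert (i + j) 1)
        d)
    (PySem.Dict.empty : PySem.Dict Int Int)).items

-- ===== PORT B =====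
-- literal port of B: dict comprehension over range(2, 2*sides+1) with the triangular formula
def dices_alt (sides : Int) : List (Int × Int) :=
  (PySem.List.pyRange 2 (2 * sides + 1) 1).map (fun s => (s, sides - |s - (sides + 1)|))

-- ===== PRECONDITION & SPEC =====
def Spec_dices (sides : Int) (out : List (Int × Int)) : Prop := out = dices_alt sides
instance (sides : Int) (out : List (Int × Int)) : Decidable (Spec_dices sides out) := by unfold Spec_dices; infer_instance

-- ===== CLAIM (what is proved, stated in full; the proofs are below) =====
def Claim_equal_dices : Prop := ∀ (sides : Int), Dom_dices sides → Spec_dices sides (dices sides)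

-- ===== LEMMAS AND PROOFS =====

-- A's guarded dict update is exactly Dict.modify with default 0
theorem step_eq (d : PySem.Dict Int Int) (k : Int) :
    (if d.contains k then d.modify k 0 (· + 1) else d.insert k 1) = d.modify k 0 (· + 1) := by
  by_cases h : d.contains k
  · simp [h]
  · simp only [h, if_neg, Bool.false_eq_true, not_false_iff]
    unfold PySem.Dict.modify
    rw [PySem.Dict.getD_of_not_contains d 0 (by simpa using h)]
    norm_num

-- the inner row of sums: [i+j for j in range(1, s+1)] = range(i+1, i+s+1)
theorem row_eq (i s : Int) :
    (PySem.List.pyRange 1 (s + 1) 1).map (fun j => i + j) = PySem.List.pyRange (i + 1) (i + s + 1) 1 := by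
  rw [PySem.List.pyRange_one, PySem.List.pyRange_one, List.map_map]
  have h : (s + 1 - 1).toNat = (i + s + 1 - (i + 1)).toNat := by omega
  rw [← h]
  apply List.map_congr_left
  intro k _
  simp only [Function.comp]
  ring

-- A's dict is the counter of the flattened list of sums
theorem dices_eq_counter (sides : Int) :
    dices sides =
      (PySem.Dict.counter ((PySem.List.pyRange 1 (sides + 1) 1).flatMap
        (fun i => PySem.List.pyRange (i + 1) (i + sides + 1) 1))).items := by
  unfold dices
  rw [PySem.Dict.counter_eq_foldl, List.foldl_flatMap]
  congr 1
  congr 1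
  funext d i
  rw [← row_eq i sides, List.foldl_map]
  congr 1
  funext d' j
  exact step_eq d' (i + j)

-- items of a nodup-keyed dict, reconstructed from keys and getD
theorem items_eq_keys_map {κ ν : Type} [BEq κ] [LawfulBEq κ] (d : PySem.Dict κ ν)
    (h : d.keys.Nodup) (d0 : ν) :
    d.items = d.keys.map (fun k => (k, d.getD k d0)) := by
  unfold PySem.Dict.keys
  rw [List.map_map]
  conv_lhs => rw [← List.map_id d.items]
  apply List.map_congr_left
  intro p hp
  have : d.getD p.1 d0 = p.2 :=
    PySem.Dict.getD_of_mem_items d (by simpa using hp) h d0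
  simp [Function.comp, this]

-- foldl Set.add over elements already present does nothing
theorem foldl_add_of_mem (xs : List Int) : ∀ (acc : PySem.Set Int),
    (∀ x ∈ xs, x ∈ acc) → xs.foldl PySem.Set.add acc = acc := by
  induction xs with
  | nil => intro acc _; rfl
  | cons x xs ih =>
      intro acc h
      have hx : acc.contains x := by
        simp; exact h x (by simp)
      simp only [List.foldl_cons, PySem.Set.add, hx, if_pos]
      exact ih acc (fun y hy => h y (by simp [hy]))

-- foldl Set.add of fresh nodup elements appends them
theorem foldl_add_of_nodup (xs : List Int) : ∀ (acc : PySem.Set Int),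
    (acc ++ xs).Nodup → xs.foldl PySem.Set.add acc = acc ++ xs := by
  induction xs with
  | nil => intro acc _; simp
  | cons x xs ih =>
      intro acc h
      have hx : acc.contains x = false := by
        simp
        intro hmem
        have := List.disjoint_of_nodup_append h
        exact (this hmem (by simp))
      simp only [List.foldl_cons, PySem.Set.add, hx]
      norm_num
      rw [ih (acc ++ [x]) (by simpa using h)]
      simp

-- first-occurrence order of the sums is 2, 3, …, 2*sides
theorem ofList_sums (s : Int) (hs : 1 ≤ s) : ∀ (m : Nat), 1 ≤ (m : Int) → (m : Int) ≤ s →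
    PySem.Set.ofList ((PySem.List.pyRange 1 ((m : Int) + 1) 1).flatMap
        (fun i => PySem.List.pyRange (i + 1) (i + s + 1) 1)) =
      PySem.List.pyRange 2 ((m : Int) + s + 1) 1 := by
  intro m
  induction m with
  | zero => intro h _; norm_num at h
  | succ n ih =>
      intro _ hle
      by_cases hn : 1 ≤ (n : Int)
      · -- inductive step: row n+1 re-adds old sums then appends n+1+s
        have hsplit : PySem.List.pyRange 1 ((n : Int) + 1 + 1) 1 =
            PySem.List.pyRange 1 ((n : Int) + 1) 1 ++ [(n : Int) + 1] :=
          PySem.List.pyRange_one_succ_right (by omega)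
        push_cast
        rw [hsplit, List.flatMap_append]
        unfold PySem.Set.ofList
        rw [List.foldl_append]
        have ihv := ih hn (by omega)
        unfold PySem.Set.ofList at ihv
        rw [ihv]
        simp only [List.flatMap_cons, List.flatMap_nil, List.append_nil]
        have hrow : PySem.List.pyRange ((n : Int) + 1 + 1) ((n : Int) + 1 + s + 1) 1 =
            PySem.List.pyRange ((n : Int) + 2) ((n : Int) + s + 1) 1 ++ [(n : Int) + s + 1] := by
          rw [show (n : Int) + 1 + 1 = (n : Int) + 2 by ring,
              show (n : Int) + 1 + s + 1 = (n : Int) + s + 1 + 1 by ring]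
          exact PySem.List.pyRange_one_succ_right (by omega)
        rw [hrow, List.foldl_append]
        rw [foldl_add_of_mem (PySem.List.pyRange ((n : Int) + 2) ((n : Int) + s + 1) 1)
              (PySem.List.pyRange 2 ((n : Int) + s + 1) 1) (by
          intro x hx
          rw [PySem.List.mem_pyRange_one] at hx ⊢
          omega)]
        have hfresh : ((n : Int) + s + 1) ∉ PySem.List.pyRange 2 ((n : Int) + s + 1) 1 := by
          rw [PySem.List.mem_pyRange_one]; omega
        simp only [List.foldl_cons, List.foldl_nil, PySem.Set.add]
        rw [if_neg (by simp [hfresh])]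
        rw [← PySem.List.pyRange_one_succ_right (by omega)]
        congr 1
        ring
      · -- base case m = 1: the single first row, already nodup
        have hn0 : (n : Int) = 0 := by omega
        push_cast
        rw [hn0]
        norm_num
        rw [PySem.List.pyRange_one_cons (by omega), PySem.List.pyRange_one_eq_nil (by omega)]
        simp only [List.flatMap_cons, List.flatMap_nil, List.append_nil]
        unfold PySem.Set.ofList
        rw [foldl_add_of_nodup _ _ (by simp [PySem.List.nodup_pyRange_one])]
        simp only [PySem.Set.empty, List.nil_append]
        norm_num

-- counting an interval indicator over a range
theorem sum_ite_interval : ∀ (n : Nat) (a lo hi : Int),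
    ((PySem.List.pyRange a (a + (n : Int)) 1).map
      (fun i => if lo ≤ i ∧ i < hi then (1 : Nat) else 0)).sum =
    (min (a + (n : Int)) hi - max a lo).toNat := by
  intro n
  induction n with
  | zero =>
      intro a lo hi
      rw [PySem.List.pyRange_one_eq_nil (by omega)]
      simp; omega
  | succ k ih =>
      intro a lo hi
      rw [PySem.List.pyRange_one_cons (by omega)]
      simp only [List.map_cons, List.sum_cons]
      have := ih (a + 1) lo hi
      rw [show a + 1 + (k : Int) = a + ((k : Int) + 1) by ring] at this
      push_cast
      rw [this]
      split_ifs with h <;> omega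

-- the multiplicity of each sum k is the triangular count
theorem count_sums (s k : Int) :
    (((PySem.List.pyRange 1 (s + 1) 1).flatMap
        (fun i => PySem.List.pyRange (i + 1) (i + s + 1) 1)).count k : Int) =
      (min (s + 1) k - max 1 (k - s)).toNat := by
  rw [List.count_flatMap]
  have hmap : ((PySem.List.pyRange 1 (s + 1) 1).map
      (List.count k ∘ fun i => PySem.List.pyRange (i + 1) (i + s + 1) 1)) =
      ((PySem.List.pyRange 1 (s + 1) 1).map
        (fun i => if (k - s) ≤ i ∧ i < k then (1 : Nat) else 0)) := by
    apply List.map_congr_left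
    intro i _
    simp only [Function.comp]
    by_cases h : (k - s) ≤ i ∧ i < k
    · rw [if_pos h]
      exact List.count_eq_one_of_mem (PySem.List.nodup_pyRange_one _ _)
        (by rw [PySem.List.mem_pyRange_one]; omega)
    · rw [if_neg h, List.count_eq_zero]
      intro hk
      rw [PySem.List.mem_pyRange_one] at hk
      omega
  rw [hmap]
  by_cases hs : 0 ≤ s
  · have := sum_ite_interval s.toNat 1 (k - s) k
    rw [show (1 : Int) + (s.toNat : Int) = s + 1 by omega] at this
    rw [this]
  · rw [PySem.List.pyRange_one_eq_nil (by omega)]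
    simp
    omega

-- ===== VERDICT (by name: the statement is the Claim_ definition above) =====
theorem dices_spec : Claim_equal_dices := by
  intro sides _
  unfold Spec_dices dices_alt
  rw [dices_eq_counter]
  rw [items_eq_keys_map _ (PySem.Dict.nodup_keys_counter _) 0]
  rw [PySem.Dict.keys_counter]
  by_cases hs : 1 ≤ sides
  · have hof := ofList_sums sides hs sides.toNat (by omega) (by omega)
    rw [show ((sides.toNat : Int)) = sides by omega] at hof
    rw [hof, show sides + sides + 1 = 2 * sides + 1 by ring]
    apply List.map_congr_left
    intro k hk
    rw [PySem.List.mem_pyRange_one] at hk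
    have hg := PySem.Dict.getD_counter ((PySem.List.pyRange 1 (sides + 1) 1).flatMap
        (fun i => PySem.List.pyRange (i + 1) (i + sides + 1) 1)) k
    rw [hg, count_sums]
    have : (min (sides + 1) k - max 1 (k - sides)).toNat = (sides - |k - (sides + 1)|).toNat := by
      rcases abs_cases (k - (sides + 1)) with ⟨h1, h2⟩ | ⟨h1, h2⟩ <;> omega
    rw [this]
    have habs : 0 ≤ sides - |k - (sides + 1)| := by
      rcases abs_cases (k - (sides + 1)) with ⟨h1, h2⟩ | ⟨h1, h2⟩ <;> omega
    simp [Int.toNat_of_nonneg habs]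
  · rw [PySem.List.pyRange_one_eq_nil (by omega), PySem.List.pyRange_one_eq_nil (by omega)]
    simp [PySem.Set.ofList, PySem.Set.empty]
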